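-- pv_equiv track=rewrite | github.com/tuangatech/NLP-Projects | Chatbot-LangChain-ChromeDB-FastAPI/ingestion/ingest.py | create_toc_dict
-- ===== SOURCE A (Python) =====
-- from typing import List, Dict, Tuple, Optional, Any
--
-- def create_toc_dict(toc: List[Tuple[int, str, int]]) -> dict:
--     toc_dict = {}
--     for item in toc:
--         level, title, page = item
--         # Normalize title by removing extra whitespace and making case-insensitive
--         normalized_title = ' '.join(title.strip().split()).lower()
--         if normalized_title not in toc_dict:
--             toc_dict[normalized_title] = []
--         toc_dict[normalized_title].append((page, level))
--     return toc_dict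
-- ===== SOURCE B (Python) =====
-- def create_toc_dict(toc):
--     pairs = [(' '.join(title.strip().split()).lower(), (page, level))
--              for level, title, page in toc]
--     return {key: [pl for k, pl in pairs if k == key]
--             for key in dict.fromkeys(k for k, _ in pairs)}
-- ===== Notes on version B (the rewrite author's own statement) =====
-- stated objective: alternative
-- what changed: Replaces A's incremental dict-building loop (create-empty-then-append per item) with a declarative pipeline: one pass producing (normalized_title, (page, level)) pairs, an ordered key dedup via dict.fromkeys, and a per-key filter comprehension collecting each group.
import Mathlib
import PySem

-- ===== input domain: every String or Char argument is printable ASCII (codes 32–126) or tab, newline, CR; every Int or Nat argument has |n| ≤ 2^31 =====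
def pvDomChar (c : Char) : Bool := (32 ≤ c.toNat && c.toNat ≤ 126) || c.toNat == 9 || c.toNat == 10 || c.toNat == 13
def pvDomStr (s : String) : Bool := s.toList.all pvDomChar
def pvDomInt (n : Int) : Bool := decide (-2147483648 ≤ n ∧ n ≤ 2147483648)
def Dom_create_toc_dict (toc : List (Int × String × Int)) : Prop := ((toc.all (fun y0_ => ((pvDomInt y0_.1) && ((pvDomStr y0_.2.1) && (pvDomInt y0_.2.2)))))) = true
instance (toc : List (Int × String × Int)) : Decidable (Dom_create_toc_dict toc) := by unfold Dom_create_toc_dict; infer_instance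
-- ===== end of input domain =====

-- B replaces A's incremental dict-building loop with a pairs / ordered-dedup / per-key-filter pipeline (objective: alternative).

-- shared normalization, ' '.join(title.strip().split()).lower()
def pvNorm (title : String) : String :=
  PySem.Str.lower (PySem.Str.join " " (PySem.Str.split₀ (PySem.Str.strip title)))

-- ===== PORT A =====
def create_toc_dict (toc : List (Int × String × Int)) : List (String × List (Int × Int)) :=
  (toc.foldl (fun toc_dict item =>
      let level := item.1
      let title := item.2.1
      let page := item.2.2
      let normalized_title := pvNorm title
      -- if normalized_title not in toc_dict: toc_dict[normalized_title] = []
      let toc_dict := if toc_dict.contains normalized_title then toc_dict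
                      else toc_dict.insert normalized_title []
      -- toc_dict[normalized_title].append((page, level))
      toc_dict.modify normalized_title [] (fun v => v ++ [(page, level)]))
    (PySem.Dict.empty : PySem.Dict String (List (Int × Int)))).items

-- ===== PORT B =====
def create_toc_dict_alt (toc : List (Int × String × Int)) : List (String × List (Int × Int)) :=
  let pairs := toc.map (fun item => (pvNorm item.2.1, (item.2.2, item.1)))
  -- dict.fromkeys(...) = ordered first-occurrence dedup = PySem.List.dedup
  (PySem.List.dedup (pairs.map Prod.fst)).map
    (fun key => (key, (pairs.filter (fun q => q.1 == key)).map Prod.snd))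

-- ===== PRECONDITION & SPEC =====
def Spec_create_toc_dict (toc : List (Int × String × Int)) (out : List (String × List (Int × Int))) : Prop := out = create_toc_dict_alt toc
instance (toc : List (Int × String × Int)) (out : List (String × List (Int × Int))) : Decidable (Spec_create_toc_dict toc out) := by unfold Spec_create_toc_dict; infer_instance

-- ===== CLAIM (what is proved, stated in full; the proofs are below) =====
def Claim_equal_create_toc_dict : Prop := ∀ (toc : List (Int × String × Int)), Dom_create_toc_dict toc → Spec_create_toc_dict toc (create_toc_dict toc)

-- ===== LEMMAS AND PROOFS =====

theorem get?_mk_append {ν : Type} (l : List (String × ν)) (k : String) (v : ν)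
    (hk : ∀ p ∈ l, p.1 ≠ k) :
    (PySem.Dict.mk (l ++ [(k, v)])).get? k = some v := by
  induction l with
  | nil => simp [PySem.Dict.get?_mk_cons]
  | cons p t ih =>
    rw [List.cons_append, PySem.Dict.get?_mk_cons]
    have hp := hk p (by simp)
    simp only [beq_iff_eq, if_neg hp]
    exact ih (fun q hq => hk q (by simp [hq]))

-- A's per-item step (conditionally insert [] then append) is a single `modify`.
theorem step_eq_modify (d : PySem.Dict String (List (Int × Int))) (k : String) (pl : Int × Int) :
    (if d.contains k then d else d.insert k []).modify k [] (fun v => v ++ [pl])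
      = d.modify k [] (fun v => v ++ [pl]) := by
  by_cases h : d.contains k = true
  · simp [h]
  · rw [Bool.not_eq_true] at h
    simp only [h, Bool.false_eq_true, if_false]
    have hk : ∀ p ∈ d.items, p.1 ≠ k := by
      intro p hp hpk
      have : k ∈ d.keys := by
        simp only [PySem.Dict.keys]
        exact List.mem_map.mpr ⟨p, hp, hpk⟩
      rw [← PySem.Dict.contains_iff_mem_keys] at this
      simp [h] at this
    simp only [PySem.Dict.modify, PySem.Dict.insert, h, Bool.false_eq_true, if_false]
    have hget : (PySem.Dict.mk (d.items ++ [(k, ([] : List (Int × Int)))])).get? k = some [] :=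
      get?_mk_append d.items k [] hk
    have hc : (PySem.Dict.mk (d.items ++ [(k, ([] : List (Int × Int)))])).contains k = true := by
      rw [PySem.Dict.contains_eq_isSome_get?, hget]; rfl
    have hgD : (PySem.Dict.mk (d.items ++ [(k, ([] : List (Int × Int)))])).getD k [] = [] := by
      rw [PySem.Dict.getD_eq_get?_getD, hget]; rfl
    have hgD2 : d.getD k [] = [] := PySem.Dict.getD_of_not_contains d [] h
    rw [hgD2]
    simp only [hc, if_true, hgD, List.map_append, List.nil_append]
    have hmap : List.map (fun p => if p.1 = k then (k, [pl]) else p) d.items = d.items := by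
      rw [List.map_congr_left (g := id) (fun p hp => by simp [hk p hp]), List.map_id]
    simp [hmap]

theorem create_toc_dict_spec : Claim_equal_create_toc_dict := by
  intro toc _
  show create_toc_dict toc = create_toc_dict_alt toc
  unfold create_toc_dict create_toc_dict_alt
  -- rewrite A's step to a single modify over the encoded pairs
  have hstep : (fun (d : PySem.Dict String (List (Int × Int))) (item : Int × String × Int) =>
      (if d.contains (pvNorm item.2.1) then d else d.insert (pvNorm item.2.1) []).modify
        (pvNorm item.2.1) [] (fun v => v ++ [(item.2.2, item.1)]))
      = (fun d item => d.modify (pvNorm item.2.1) [] (fun v => v ++ [(item.2.2, item.1)])) := by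
    funext d item
    exact step_eq_modify d (pvNorm item.2.1) (item.2.2, item.1)
  simp only [hstep]
  set pairs := toc.map (fun item => (pvNorm item.2.1, (item.2.2, item.1))) with hpairs
  have hfold : toc.foldl (fun d item => d.modify (pvNorm item.2.1) [] (fun v => v ++ [(item.2.2, item.1)]))
        (PySem.Dict.empty : PySem.Dict String (List (Int × Int)))
      = pairs.foldl (fun d p => d.modify p.1 [] (fun v => v ++ [p.2])) PySem.Dict.empty := by
    rw [hpairs, List.foldl_map]
  rw [hfold]
  set D := pairs.foldl (fun d p => d.modify p.1 [] (fun v => v ++ [p.2]))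
    (PySem.Dict.empty : PySem.Dict String (List (Int × Int))) with hD
  have hkeys : D.keys = PySem.List.dedup (pairs.map Prod.fst) := by
    rw [hD, PySem.Dict.keys_foldl_modify_key]
    simp [PySem.Set.update_nil_left, PySem.List.dedup_eq_ofList]
  have hnodup : D.keys.Nodup := by
    rw [hkeys]; exact PySem.List.nodup_dedup _
  rw [PySem.Dict.items_eq_map_keys D hnodup [], hkeys]
  apply List.map_congr_left
  intro k _
  have hgd : D.getD k [] = (pairs.filter (fun p => p.1 == k)).map Prod.snd := by
    rw [hD, PySem.Dict.getD_foldl_modify_append]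
    simp
  rw [hgd]
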